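-- pv_equiv track=rewrite | github.com/LoolzMe/ChordJacobiDiagrams | Chord_Jacobi_Code/LinAlgebra.py | are_mult
-- ===== SOURCE A (Python) =====
-- def are_mult(v,w):
--     """
--     v,w are simplified linear combinations;
--     the function returns True if v and w are linear
--     dependent; note that every coefficient in v and w is
--     non-zero
--     """
--     if v==[] and w==[]:
--         return True
--     n =len(v)
--     if len(w)!=n:
--         return False
--     for i in range(n):
--         if v[i][1]!=w[i][1]:
--             return False
--     c_v=v[0][0]; c_w=w[0][0] #the first coefficients
--     vv = tuple(c_w*a[0] for a in v)
--     ww = tuple(c_v*a[0] for a in w)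
--     return vv==ww
--
--
--
--     """ Code that was successfully stolen from surface_dynamics
--         Self-stealing isn't a thing, r8?
--     """
-- ===== SOURCE B (Python) =====
-- def _gcd(a, b):
--     return abs(a) if b == 0 else _gcd(b, a % b)
--
-- def _frac(a, b):
--     if b < 0:
--         a, b = -a, -b
--     g = _gcd(a, b)
--     return (a // g, b // g)
--
-- def _canon(v):
--     if not v:
--         return []
--     c = v[0][0]
--     return [(s, _frac(a, c)) for a, s in v]
--
-- def are_mult(v, w):
--     return _canon(v) == _canon(w)
-- ===== Notes on version B (the rewrite author's own statement) =====
-- stated objective: alternative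
-- what changed: B canonicalizes each linear combination independently into a list of (label, gcd-reduced fraction a_i/a_0) pairs and compares the two canonical forms, instead of A's positional key loop plus cross-multiplied coefficient tuples.
-- outside the precondition, e.g. on are_mult([(0, 'a')], [(0, 'a')]): A returns True, B raises ZeroDivisionError; on are_mult([(0, 'a')], []): A returns False, B raises ZeroDivisionError
import Mathlib
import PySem

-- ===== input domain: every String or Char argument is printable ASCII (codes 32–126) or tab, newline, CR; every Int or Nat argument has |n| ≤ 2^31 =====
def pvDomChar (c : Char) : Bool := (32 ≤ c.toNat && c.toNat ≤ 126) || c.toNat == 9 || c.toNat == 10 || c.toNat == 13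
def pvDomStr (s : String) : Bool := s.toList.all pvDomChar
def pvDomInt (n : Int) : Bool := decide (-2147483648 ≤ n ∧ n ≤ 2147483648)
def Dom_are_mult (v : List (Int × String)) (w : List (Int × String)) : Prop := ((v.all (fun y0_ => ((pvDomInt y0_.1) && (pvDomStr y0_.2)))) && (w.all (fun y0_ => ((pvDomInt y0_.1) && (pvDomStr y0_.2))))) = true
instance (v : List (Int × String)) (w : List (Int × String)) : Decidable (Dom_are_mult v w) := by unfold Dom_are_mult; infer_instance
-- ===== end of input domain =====

-- B: a different algorithm — canonicalize each combination independently to a list of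
-- (label, gcd-reduced fraction a_i / a_0) and compare the two canonical forms,
-- instead of A's positional cross-multiplication check; same O(n) cost (objective: alternative).

-- ===== PORT A =====
-- literal port of A: empty-both guard, length guard, key-check loop over range(n),
-- then the two coefficient tuples vv/ww built by comprehensions and compared.
def are_mult (v : List (Int × String)) (w : List (Int × String)) : Bool :=
  if v = [] ∧ w = [] then true
  else
    let n := v.length
    if w.length ≠ n then false
    else if !((List.range n).all (fun i =>
          (v.getD i (0, "")).2 == (w.getD i (0, "")).2)) then false
    else
      let c_v := (v.getD 0 (0, "")).1   -- v[0][0]; v is nonempty on this path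
      let c_w := (w.getD 0 (0, "")).1
      let vv := v.map (fun a => c_w * a.1)
      let ww := w.map (fun a => c_v * a.1)
      vv == ww

-- ===== PORT B =====
-- port of B's _gcd: recursive Euclid, 'abs(a) if b == 0 else _gcd(b, a % b)' (Python %)
def pyGcd (a b : Int) : Int :=
  if b = 0 then (a.natAbs : Int) else pyGcd b (PySem.Int.mod a b)
termination_by b.natAbs
decreasing_by
  rename_i h
  rcases lt_trichotomy b 0 with hb | hb | hb
  · have := PySem.Int.mod_neg_bounds a hb; omega
  · exact absurd hb h
  · have h1 := PySem.Int.mod_nonneg a hb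
    have h2 := PySem.Int.mod_lt a hb
    omega

-- port of B's _frac: flip signs if b < 0, divide both by the gcd (Python //)
def pyFrac (a b : Int) : Int × Int :=
  let a' := if b < 0 then -a else a
  let b' := if b < 0 then -b else b
  let g := pyGcd a' b'
  (PySem.Int.floordiv a' g, PySem.Int.floordiv b' g)

-- port of B's _canon: [] for the empty list, else [(s, _frac(a, c)) for a, s in v] with c = v[0][0]
def pyCanon (v : List (Int × String)) : List (String × (Int × Int)) :=
  match v with
  | [] => []
  | (c, _) :: _ => v.map (fun p => (p.2, pyFrac p.1 c))

def are_mult_alt (v : List (Int × String)) (w : List (Int × String)) : Bool :=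
  pyCanon v == pyCanon w

-- ===== PRECONDITION & SPEC =====
-- Pre_ excludes inputs whose first coefficient is 0 (the docstring guarantees every
-- coefficient is non-zero): there B's gcd-reduction divides by gcd(0,0)=0 and raises
-- ZeroDivisionError, while A still returns a value.
def Pre_are_mult (v : List (Int × String)) (w : List (Int × String)) : Prop :=
  (v = [] ∨ (v.headD (0, "")).1 ≠ 0) ∧ (w = [] ∨ (w.headD (0, "")).1 ≠ 0)
instance (v : List (Int × String)) (w : List (Int × String)) : Decidable (Pre_are_mult v w) := by unfold Pre_are_mult; infer_instance
def pvWitness_are_mult : (List (Int × String)) × (List (Int × String)) := ([(2, "a"), (3, "b")], [(4, "a"), (6, "b")])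

def Spec_are_mult (v : List (Int × String)) (w : List (Int × String)) (out : Bool) : Prop := out = are_mult_alt v w
instance (v : List (Int × String)) (w : List (Int × String)) (out : Bool) : Decidable (Spec_are_mult v w out) := by unfold Spec_are_mult; infer_instance

-- ===== CLAIM (what is proved, stated in full; the proofs are below) =====
def Claim_equal_are_mult : Prop := ∀ (v : List (Int × String)) (w : List (Int × String)), Dom_are_mult v w → Pre_are_mult v w → Spec_are_mult v w (are_mult v w)

-- ===== LEMMAS AND PROOFS =====

-- the recursive Euclid gcd is Int.gcd
lemma pyGcd_eq (a b : Int) : pyGcd a b = (Int.gcd a b : Int) := by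
  induction a, b using pyGcd.induct with
  | case1 a =>
    rw [pyGcd]; simp [Int.gcd]
  | case2 a b h ih =>
    rw [pyGcd, if_neg h, ih]
    have hm : PySem.Int.mod a b = a + (-(PySem.Int.floordiv a b)) * b := by
      have := PySem.Int.floordiv_mul_add_mod a b; linarith
    rw [hm]
    congr 1
    rw [Int.gcd_add_mul_right_right, Int.gcd_comm]

-- for 0 < b, B's reduced fraction is (num, den) of mkRat a b.toNat
lemma pyFrac_pos (a b : Int) (hb : 0 < b) :
    pyFrac a b = ((mkRat a b.toNat).num, (((mkRat a b.toNat).den : Nat) : Int)) := by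
  have hb' : ¬ b < 0 := by omega
  have hbn : b.toNat ≠ 0 := by omega
  have hg : pyGcd a b = ((Nat.gcd b.toNat a.natAbs : Nat) : Int) := by
    rw [pyGcd_eq, Int.gcd, Nat.gcd_comm]
    congr 2
    omega
  have hgpos : (0 : Int) < ((Nat.gcd b.toNat a.natAbs : Nat) : Int) := by
    have : Nat.gcd b.toNat a.natAbs ≠ 0 := fun hc => hbn (Nat.eq_zero_of_gcd_eq_zero_left hc)
    omega
  rw [pyFrac]
  simp only [hb', if_false]
  rw [hg, Rat.num_mkRat, Rat.den_mkRat, if_neg hbn, if_neg hbn]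
  rw [PySem.Int.floordiv_eq_ediv_of_pos hgpos, PySem.Int.floordiv_eq_ediv_of_pos hgpos]
  rw [Int.natCast_div]
  congr 2
  omega

-- for b ≠ 0, B's reduced fraction is (num, den) of the rational a /. b
lemma pyFrac_eq_divInt (a b : Int) (hb : b ≠ 0) :
    pyFrac a b = ((Rat.divInt a b).num, (((Rat.divInt a b).den : Nat) : Int)) := by
  rcases lt_or_gt_of_ne hb with hneg | hpos
  · have h1 := pyFrac_pos (-a) (-b) (by omega)
    have h2 : pyFrac a b = pyFrac (-a) (-b) := by
      unfold pyFrac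
      rw [if_pos hneg, if_pos hneg, if_neg (show ¬ ((-b) < 0) by omega),
        if_neg (show ¬ ((-b) < 0) by omega)]
    rw [h2, h1, ← Rat.neg_divInt_neg a b]
    rw [show Rat.divInt (-a) (-b) = mkRat (-a) (-b).toNat by
          rw [← Rat.divInt_ofNat]; congr 1; omega]
  · rw [pyFrac_pos a b hpos]
    rw [show Rat.divInt a b = mkRat a b.toNat by
          rw [← Rat.divInt_ofNat]; congr 1; omega]

-- rational equality is componentwise on (num, den)
lemma rat_eq_iff (p q : Rat) : p = q ↔ (p.num = q.num ∧ p.den = q.den) :=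
  ⟨fun h => by rw [h]; exact ⟨rfl, rfl⟩, fun h => Rat.ext h.1 h.2⟩

-- the heart: two reduced fractions are equal iff the cross products are equal
lemma pyFrac_eq_iff (a b a0 b0 : Int) (ha0 : a0 ≠ 0) (hb0 : b0 ≠ 0) :
    (pyFrac a a0 = pyFrac b b0) ↔ b0 * a = a0 * b := by
  rw [pyFrac_eq_divInt a a0 ha0, pyFrac_eq_divInt b b0 hb0]
  rw [Prod.ext_iff]
  simp only [Int.natCast_inj]
  rw [← rat_eq_iff, Rat.divInt_eq_divInt_iff ha0 hb0]
  constructor <;> intro h <;> linarith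

-- fused pass = key loop && coefficient-tuple equality, for equal-length lists
lemma fuse (a0 b0 : Int) :
    ∀ (v w : List (Int × String)), v.length = w.length →
    (((List.range v.length).all (fun i =>
        (v.getD i (0, "")).2 == (w.getD i (0, "")).2)) &&
      (v.map (fun a => b0 * a.1) == w.map (fun a => a0 * a.1)))
    = (List.zip v w).all (fun p => p.1.2 == p.2.2 && b0 * p.1.1 == a0 * p.2.1) := by
  intro v
  induction v with
  | nil => intro w h; cases w with
    | nil => rfl
    | cons y w => simp at h
  | cons x v ih =>
    intro w h
    cases w with
    | nil => simp at h
    | cons y w =>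
      have key := ih w (by simpa using h)
      simp only [List.length_cons, List.range_succ_eq_map, List.all_cons, List.all_map,
        List.getD_cons_zero, List.getD_cons_succ, List.map_cons, List.cons_beq_cons,
        List.zip_cons_cons, Function.comp_def] at key ⊢
      rw [← key]
      cases (x.2 == y.2) <;> cases ((b0 * x.1 : Int) == a0 * y.1) <;> simp

-- zipped cross-multiplication test = equality of the two canonical maps (equal lengths)
lemma zip_eq_canon (a0 b0 : Int) (ha0 : a0 ≠ 0) (hb0 : b0 ≠ 0) :
    ∀ (v w : List (Int × String)), v.length = w.length →
    ((List.zip v w).all (fun p => p.1.2 == p.2.2 && b0 * p.1.1 == a0 * p.2.1))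
    = (v.map (fun p => (p.2, pyFrac p.1 a0)) == w.map (fun p => (p.2, pyFrac p.1 b0))) := by
  intro v
  induction v with
  | nil => intro w h; cases w with
    | nil => rfl
    | cons y w => simp at h
  | cons x v ih =>
    intro w h
    cases w with
    | nil => simp at h
    | cons y w =>
      have key := ih w (by simpa using h)
      simp only [List.zip_cons_cons, List.all_cons, List.map_cons, List.cons_beq_cons] at key ⊢
      rw [← key]
      have hhead : ((x.2 == y.2) && (b0 * x.1 == a0 * y.1))
          = ((x.2, pyFrac x.1 a0) == (y.2, pyFrac y.1 b0)) := by
        rw [Bool.eq_iff_iff]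
        simp only [Bool.and_eq_true, beq_iff_eq, Prod.mk.injEq]
        exact and_congr_right fun _ => (pyFrac_eq_iff x.1 y.1 a0 b0 ha0 hb0).symm
      rw [hhead]

-- ===== VERDICT (by name: the statement is the Claim_ definition above) =====
theorem are_mult_spec : Claim_equal_are_mult := by
  intro v w _ hpre
  unfold Spec_are_mult are_mult are_mult_alt
  cases v with
  | nil => cases w with
    | nil => rfl
    | cons y w => simp [pyCanon]
  | cons x v =>
    obtain ⟨xa, xs⟩ := x
    have ha0 : xa ≠ 0 := by
      rcases hpre.1 with h | h
      · exact absurd h (by simp)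
      · simpa using h
    cases w with
    | nil => simp [pyCanon]
    | cons y w =>
      obtain ⟨ya, ys⟩ := y
      have hb0 : ya ≠ 0 := by
        rcases hpre.2 with h | h
        · exact absurd h (by simp)
        · simpa using h
      have hc1 : pyCanon ((xa, xs) :: v)
          = ((xa, xs) :: v).map (fun p => (p.2, pyFrac p.1 xa)) := rfl
      have hc2 : pyCanon ((ya, ys) :: w)
          = ((ya, ys) :: w).map (fun p => (p.2, pyFrac p.1 ya)) := rfl
      rw [hc1, hc2]
      by_cases hlen : ((xa, xs) :: v).length = ((ya, ys) :: w).length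
      · rw [if_neg (by simp),
          if_neg (show ¬ ((ya, ys) :: w).length ≠ ((xa, xs) :: v).length from by simp [hlen])]
        rw [show ((((xa, xs) :: v).map (fun p => (p.2, pyFrac p.1 xa)))
              == (((ya, ys) :: w).map (fun p => (p.2, pyFrac p.1 ya))))
            = ((List.zip ((xa, xs) :: v) ((ya, ys) :: w)).all
                (fun p => p.1.2 == p.2.2 && ya * p.1.1 == xa * p.2.1)) from
            (zip_eq_canon xa ya ha0 hb0 ((xa, xs) :: v) ((ya, ys) :: w) hlen).symm]
        rw [← fuse xa ya ((xa, xs) :: v) ((ya, ys) :: w) hlen]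
        simp only [List.getD_cons_zero]
        cases hk : ((List.range (((xa, xs) :: v)).length).all (fun i =>
            (((xa, xs) :: v).getD i (0, "")).2 == (((ya, ys) :: w).getD i (0, "")).2)) <;>
          simp
      · rw [if_neg (by simp), if_pos (by simpa [eq_comm] using hlen)]
        have hne : ((xa, xs) :: v).map (fun p => (p.2, pyFrac p.1 xa))
            ≠ ((ya, ys) :: w).map (fun p => (p.2, pyFrac p.1 ya)) := by
          intro hcon
          exact hlen (by simpa using congrArg List.length hcon)
        exact (beq_eq_false_iff_ne.mpr hne).symm
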